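-- pv_equiv track=rewrite | github.com/exponential-decay/demystify | libs/DroidAnalysisClass.py | __getoffs__
-- ===== SOURCE A (Python) =====
-- def __getoffs__(basis, length, filesize):
--     if length == 1:
--         pos = int(basis[0])
--         pos_len = int(basis[1])
--         bof = pos + pos_len
--         eof = filesize - pos
--         return bof, None, filesize
--     else:
--         bof = 0
--         eof = 0
--         for x in range(length):
--             tmppos = basis[x * 2]
--             tmplen = basis[(x * 2) + 1]
--             tmpbof = int(tmppos) + int(tmplen)
--             tmpeof = filesize - int(tmppos)
--             if tmpbof < tmpeof:
--                 bof = tmpbof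
--             elif tmpeof < tmpbof:
--                 eof = tmpeof
--         return bof, eof, filesize
-- ===== SOURCE B (Python) =====
-- def __getoffs__(basis, length, filesize):
--     if length == 1:
--         pos = int(basis[0])
--         pos_len = int(basis[1])
--         bof = pos + pos_len
--         eof = filesize - pos
--         return bof, None, filesize
--     else:
--         bof = 0
--         eof = 0
--         bof_found = False
--         eof_found = False
--         for x in range(length - 1, -1, -1):
--             tmppos = basis[x * 2]
--             tmplen = basis[(x * 2) + 1]
--             tmpbof = int(tmppos) + int(tmplen)
--             tmpeof = filesize - int(tmppos)
--             if not bof_found and tmpbof < tmpeof: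
--                 bof = tmpbof
--                 bof_found = True
--             if not eof_found and tmpeof < tmpbof:
--                 eof = tmpeof
--                 eof_found = True
--             if bof_found and eof_found:
--                 break
--         return bof, eof, filesize
-- ===== Notes on version B (the rewrite author's own statement) =====
-- stated objective: alternative
-- what changed: The forward fold that keeps overwriting bof/eof with the last qualifying element is replaced by a reverse traversal with found-flags and an early break that takes the first qualifying element from the end (last forward match = first reverse match).
import Mathlib
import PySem

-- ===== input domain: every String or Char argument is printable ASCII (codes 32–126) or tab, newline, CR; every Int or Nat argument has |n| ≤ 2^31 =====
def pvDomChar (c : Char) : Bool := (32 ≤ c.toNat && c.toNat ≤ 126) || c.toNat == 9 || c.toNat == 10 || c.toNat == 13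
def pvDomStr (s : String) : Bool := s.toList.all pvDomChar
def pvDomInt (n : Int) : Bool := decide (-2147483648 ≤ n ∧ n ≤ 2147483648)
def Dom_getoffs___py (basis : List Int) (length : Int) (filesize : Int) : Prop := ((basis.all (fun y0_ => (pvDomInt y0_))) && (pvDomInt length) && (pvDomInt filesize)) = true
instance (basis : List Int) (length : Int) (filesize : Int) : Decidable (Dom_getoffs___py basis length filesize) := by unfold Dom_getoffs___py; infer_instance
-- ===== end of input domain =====

-- B replaces A's overwrite-as-you-go forward fold by a reverse scan with found-flags and
-- an early break (alternative decomposition, same cost); equivalence proved on Pre_.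


-- ===== PORT A =====
-- literal port of A; basis[i] is ported with pyGetD (in range on Pre_, where Python would raise Pre_ excludes)
def getoffs___py (basis : List Int) (length : Int) (filesize : Int) : Int × Option Int × Int :=
  if length = 1 then
    let pos := PySem.List.pyGetD basis 0 0
    let pos_len := PySem.List.pyGetD basis 1 0
    let bof := pos + pos_len
    let _eof := filesize - pos
    (bof, none, filesize)
  else
    let r := (PySem.List.pyRange 0 length 1).foldl (fun (s : Int × Int) x =>
      let tmppos := PySem.List.pyGetD basis (x * 2) 0
      let tmplen := PySem.List.pyGetD basis (x * 2 + 1) 0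
      let tmpbof := tmppos + tmplen
      let tmpeof := filesize - tmppos
      if tmpbof < tmpeof then (tmpbof, s.2)
      else if tmpeof < tmpbof then (s.1, tmpeof)
      else s) (0, 0)
    (r.1, some r.2, filesize)

-- ===== PORT B =====
-- the reverse loop of Source B with its two found-flags and early break
def getoffsGoB (basis : List Int) (filesize : Int) :
    List Int → Int → Int → Bool → Bool → Int × Int
  | [], bof, eof, _, _ => (bof, eof)
  | x :: rest, bof, eof, bof_found, eof_found =>
    let tmppos := PySem.List.pyGetD basis (x * 2) 0
    let tmplen := PySem.List.pyGetD basis (x * 2 + 1) 0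
    let tmpbof := tmppos + tmplen
    let tmpeof := filesize - tmppos
    let p1 : Int × Bool := if !bof_found && decide (tmpbof < tmpeof) then (tmpbof, true) else (bof, bof_found)
    let p2 : Int × Bool := if !eof_found && decide (tmpeof < tmpbof) then (tmpeof, true) else (eof, eof_found)
    if p1.2 && p2.2 then (p1.1, p2.1)
    else getoffsGoB basis filesize rest p1.1 p2.1 p1.2 p2.2

def getoffs___py_alt (basis : List Int) (length : Int) (filesize : Int) : Int × Option Int × Int :=
  if length = 1 then
    let pos := PySem.List.pyGetD basis 0 0
    let pos_len := PySem.List.pyGetD basis 1 0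
    let bof := pos + pos_len
    let _eof := filesize - pos
    (bof, none, filesize)
  else
    let r := getoffsGoB basis filesize (PySem.List.pyRange (length - 1) (-1) (-1)) 0 0 false false
    (r.1, some r.2, filesize)

-- ===== PRECONDITION & SPEC =====
-- Pre_ excludes exactly the inputs on which Python A raises IndexError:
-- length == 1 needs basis[0] and basis[1]; otherwise the loop reads basis[2x], basis[2x+1] for x < length.
def Pre_getoffs___py (basis : List Int) (length : Int) (filesize : Int) : Prop :=
  if length = 1 then 2 ≤ basis.length else 2 * length ≤ (basis.length : Int)
instance (basis : List Int) (length : Int) (filesize : Int) : Decidable (Pre_getoffs___py basis length filesize) := by unfold Pre_getoffs___py; infer_instance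

def pvWitness_getoffs___py : List Int × Int × Int := ([3, 4, 10, 2], 2, 100)

def Spec_getoffs___py (basis : List Int) (length : Int) (filesize : Int) (out : Int × Option Int × Int) : Prop := out = getoffs___py_alt basis length filesize
instance (basis : List Int) (length : Int) (filesize : Int) (out : Int × Option Int × Int) : Decidable (Spec_getoffs___py basis length filesize out) := by unfold Spec_getoffs___py; infer_instance

-- ===== CLAIM (what is proved, stated in full; the proofs are below) =====
def Claim_equal_getoffs___py : Prop := ∀ (basis : List Int) (length : Int) (filesize : Int), Dom_getoffs___py basis length filesize → Pre_getoffs___py basis length filesize → Spec_getoffs___py basis length filesize (getoffs___py basis length filesize)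

-- ===== LEMMAS AND PROOFS =====

-- characterisation of A's fold: each component is the image of the LAST qualifying x,
-- i.e. the first qualifying x of the reversed list.
theorem foldA_char (basis : List Int) (filesize : Int) (xs : List Int) (b e : Int) :
    xs.foldl (fun (s : Int × Int) x =>
      let tmppos := PySem.List.pyGetD basis (x * 2) 0
      let tmplen := PySem.List.pyGetD basis (x * 2 + 1) 0
      let tmpbof := tmppos + tmplen
      let tmpeof := filesize - tmppos
      if tmpbof < tmpeof then (tmpbof, s.2)
      else if tmpeof < tmpbof then (s.1, tmpeof)
      else s) (b, e)
    = ((match xs.reverse.find? (fun x =>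
          decide (PySem.List.pyGetD basis (x * 2) 0 + PySem.List.pyGetD basis (x * 2 + 1) 0
            < filesize - PySem.List.pyGetD basis (x * 2) 0)) with
        | some x => PySem.List.pyGetD basis (x * 2) 0 + PySem.List.pyGetD basis (x * 2 + 1) 0
        | none => b),
       (match xs.reverse.find? (fun x =>
          decide (filesize - PySem.List.pyGetD basis (x * 2) 0
            < PySem.List.pyGetD basis (x * 2) 0 + PySem.List.pyGetD basis (x * 2 + 1) 0)) with
        | some x => filesize - PySem.List.pyGetD basis (x * 2) 0
        | none => e)) := by
  induction xs generalizing b e with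
  | nil => simp
  | cons x xs ih =>
    simp only [List.foldl_cons, List.reverse_cons, List.find?_append, List.find?_cons,
      List.find?_nil]
    by_cases hP : (PySem.List.pyGetD basis (x * 2) 0 + PySem.List.pyGetD basis (x * 2 + 1) 0
        < filesize - PySem.List.pyGetD basis (x * 2) 0) <;>
    by_cases hQ : (filesize - PySem.List.pyGetD basis (x * 2) 0
        < PySem.List.pyGetD basis (x * 2) 0 + PySem.List.pyGetD basis (x * 2 + 1) 0) <;>
    simp only [hP, hQ, if_pos, if_neg, decide_true, decide_false,
      not_false_iff, ih] <;>
    cases hfp : xs.reverse.find? (fun x =>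
        decide (PySem.List.pyGetD basis (x * 2) 0 + PySem.List.pyGetD basis (x * 2 + 1) 0
          < filesize - PySem.List.pyGetD basis (x * 2) 0)) <;>
    cases hfq : xs.reverse.find? (fun x =>
        decide (filesize - PySem.List.pyGetD basis (x * 2) 0
          < PySem.List.pyGetD basis (x * 2) 0 + PySem.List.pyGetD basis (x * 2 + 1) 0)) <;>
    simp_all <;> omega

-- characterisation of B's loop: a set flag freezes its component; an unset one takes the
-- first qualifying element of the remaining list.
theorem goB_char (basis : List Int) (filesize : Int) (ys : List Int) (b e : Int) (fb fe : Bool) :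
    getoffsGoB basis filesize ys b e fb fe
    = ((if fb then b else
        match ys.find? (fun x =>
          decide (PySem.List.pyGetD basis (x * 2) 0 + PySem.List.pyGetD basis (x * 2 + 1) 0
            < filesize - PySem.List.pyGetD basis (x * 2) 0)) with
        | some x => PySem.List.pyGetD basis (x * 2) 0 + PySem.List.pyGetD basis (x * 2 + 1) 0
        | none => b),
       (if fe then e else
        match ys.find? (fun x =>
          decide (filesize - PySem.List.pyGetD basis (x * 2) 0
            < PySem.List.pyGetD basis (x * 2) 0 + PySem.List.pyGetD basis (x * 2 + 1) 0)) with
        | some x => filesize - PySem.List.pyGetD basis (x * 2) 0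
        | none => e)) := by
  induction ys generalizing b e fb fe with
  | nil => cases fb <;> cases fe <;> simp [getoffsGoB]
  | cons x ys ih =>
    simp only [getoffsGoB, List.find?_cons]
    by_cases hP : (PySem.List.pyGetD basis (x * 2) 0 + PySem.List.pyGetD basis (x * 2 + 1) 0
        < filesize - PySem.List.pyGetD basis (x * 2) 0) <;>
    by_cases hQ : (filesize - PySem.List.pyGetD basis (x * 2) 0
        < PySem.List.pyGetD basis (x * 2) 0 + PySem.List.pyGetD basis (x * 2 + 1) 0) <;>
    cases fb <;> cases fe <;>
    simp only [hP, hQ, decide_true, decide_false, Bool.not_true, Bool.not_false,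
      Bool.true_and, Bool.and_true, Bool.and_false, if_true, ih] <;>
    simp_all

-- ===== VERDICT (by name: the statement is the Claim_ definition above) =====

theorem getoffs___py_spec : Claim_equal_getoffs___py := by
  intro basis length filesize _hDom _hPre
  unfold Spec_getoffs___py getoffs___py getoffs___py_alt
  split_ifs with h1
  · rfl
  · rw [foldA_char, goB_char, PySem.List.pyRange_neg_one_eq_reverse]
    norm_num
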